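-- pv_equiv track=rewrite | github.com/russhughes/wt32sc01py | utils/make_gpio_table.py | make_bitmaps
-- ===== SOURCE A (Python) =====
-- pins = [9, 46, 3, 8, 18, 17, 16,  15]
--
-- def make_bitmaps(b):
--
--     gpio_out_w1ts = 0
--     gpio_out1_w1ts = 0
--
--     # for bit in the byte
--     for bit, pin in enumerate(pins):
--         if b & (1 << bit):
--             if pin < 32:
--                 gpio_out_w1ts |= (1 << pin)
--             else:
--                 gpio_out1_w1ts |= (1 << (pin - 32))
--
--     return (gpio_out_w1ts, gpio_out1_w1ts)
-- ===== SOURCE B (Python) =====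
-- pins = [9, 46, 3, 8, 18, 17, 16,  15]
--
-- # 256-entry table built once by doubling: _LOOKUP[x] is the pair of masks for byte x.
-- _LOOKUP = [(0, 0)]
-- for _pin in pins:
--     if _pin < 32:
--         _m = (1 << _pin, 0)
--     else:
--         _m = (0, 1 << (_pin - 32))
--     _LOOKUP += [(lo | _m[0], hi | _m[1]) for (lo, hi) in _LOOKUP]
--
-- def make_bitmaps(b):
--     return _LOOKUP[b & 0xff]
-- ===== Notes on version B (the rewrite author's own statement) =====
-- stated objective: alternative
-- what changed: Per-call bit loop over pins is replaced by a 256-entry lookup table built once at module load by a doubling construction; each call is a single index with b & 0xff.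
import Mathlib
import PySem

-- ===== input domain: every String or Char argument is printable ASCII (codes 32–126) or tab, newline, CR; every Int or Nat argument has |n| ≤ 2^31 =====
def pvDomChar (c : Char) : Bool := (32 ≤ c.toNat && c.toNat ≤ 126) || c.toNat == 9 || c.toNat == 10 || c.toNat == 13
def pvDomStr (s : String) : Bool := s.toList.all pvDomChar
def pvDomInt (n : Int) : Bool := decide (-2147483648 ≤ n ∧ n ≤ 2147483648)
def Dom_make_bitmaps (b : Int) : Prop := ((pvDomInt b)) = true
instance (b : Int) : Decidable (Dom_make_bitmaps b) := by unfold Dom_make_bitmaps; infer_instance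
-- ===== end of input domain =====

-- B replaces A's per-call bit loop by a 256-entry table built once by doubling, indexed with b & 0xff (objective: alternative/faster per call).

set_option maxRecDepth 100000
set_option maxHeartbeats 1000000

-- ===== PORT A =====
def pvPins : List Int := [9, 46, 3, 8, 18, 17, 16, 15]

-- literal port of A; the loop indices and pins are nonnegative, so '.toNat' on them is exact
def make_bitmaps (b : Int) : Int × Int :=
  (PySem.List.enumerate pvPins).foldl
    (fun (st : Int × Int) (bp : Int × Int) =>
      if PySem.Int.band b ((1:Int) <<< bp.1.toNat) ≠ 0 then
        if bp.2 < 32 then (PySem.Int.bor st.1 ((1:Int) <<< bp.2.toNat), st.2)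
        else (st.1, PySem.Int.bor st.2 ((1:Int) <<< (bp.2 - 32).toNat))
      else st)
    (0, 0)

-- ===== PORT B =====
-- the module-load table of Source B: doubling construction, one step per pin
def pvLookup : List (Int × Int) :=
  pvPins.foldl
    (fun (acc : List (Int × Int)) (pin : Int) =>
      let m : Int × Int := if pin < 32 then ((1:Int) <<< pin.toNat, 0) else (0, (1:Int) <<< (pin - 32).toNat)
      acc ++ acc.map (fun lh => (PySem.Int.bor lh.1 m.1, PySem.Int.bor lh.2 m.2)))
    [(0, 0)]

-- _LOOKUP[b & 0xff]; the masked index is always within the table, so the getD default is never used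
def make_bitmaps_alt (b : Int) : Int × Int :=
  (PySem.List.pyGet? pvLookup (PySem.Int.band b 255)).getD (0, 0)

-- ===== PRECONDITION & SPEC =====
def Spec_make_bitmaps (b : Int) (out : Int × Int) : Prop := out = make_bitmaps_alt b
instance (b : Int) (out : Int × Int) : Decidable (Spec_make_bitmaps b out) := by unfold Spec_make_bitmaps; infer_instance

-- ===== CLAIM (what is proved, stated in full; the proofs are below) =====
def Claim_equal_make_bitmaps : Prop := ∀ (b : Int), Dom_make_bitmaps b → Spec_make_bitmaps b (make_bitmaps b)

-- ===== LEMMAS AND PROOFS =====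

-- masking with 255 first does not change a conjunction with any m < 256 (Nat side)
theorem pv_and255 (n m : Nat) (h : m < 256) : (n &&& 255) &&& m = n &&& m := by
  rw [Nat.and_assoc]
  congr 1
  rw [Nat.and_comm]
  have := Nat.and_two_pow_sub_one_eq_mod m 8
  norm_num at this; omega

-- for r, m < 256, (255 - r) is the 8-bit complement of r, so its conjunction with m is m minus the common bits
theorem pv_sub_and (r m : Nat) (hr : r < 256) (hm : m < 256) :
    (255 - r) &&& m = m - (m &&& r) := by
  exact (by decide : ∀ r m : Fin 256, (255 - r.val) &&& m.val = m.val - (m.val &&& r.val)) ⟨r, hr⟩ ⟨m, hm⟩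

theorem pv_and_mod (m n : Nat) (hm : m < 256) : m &&& n = m &&& (n % 256) := by
  have h1 : m &&& 255 = m := by
    have := Nat.and_two_pow_sub_one_eq_mod m 8
    norm_num at this; omega
  conv_lhs => rw [← h1]
  rw [Nat.and_assoc, Nat.and_comm 255 n]
  have := Nat.and_two_pow_sub_one_eq_mod n 8
  norm_num at this; rw [this]

-- key lemma: b & 255 & m = b & m for every Int b and every m < 256
theorem pvK (b : Int) (m : Nat) (hm : m < 256) :
    PySem.Int.band (PySem.Int.band b 255) (m : Int) = PySem.Int.band b (m : Int) := by
  by_cases hb : 0 ≤ b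
  · rw [PySem.Int.band_of_nonneg hb (by norm_num), PySem.Int.band_of_nonneg hb (by norm_num)]
    rw [show ((255:Int).toNat) = 255 from rfl, show ((m:Int).toNat) = m from Int.toNat_natCast m]
    rw [PySem.Int.band_natCast]
    exact congrArg _ (pv_and255 _ _ hm)
  · have hneg : ∀ k : Nat, PySem.Int.band b (k:Int) = ((k - (k &&& (-b-1).toNat) : Nat) : Int) := by
      intro k; simp [PySem.Int.band, hb]
    rw [show (255:Int) = ((255:Nat):Int) by norm_num]
    rw [hneg 255, hneg m, PySem.Int.band_natCast]
    set n := (-b-1).toNat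
    have h255 : 255 &&& n = n % 256 := by
      rw [Nat.and_comm]
      have := Nat.and_two_pow_sub_one_eq_mod n 8
      norm_num at this; exact this
    rw [h255, pv_and_mod m n hm, pv_sub_and (n % 256) m (Nat.mod_lt _ (by norm_num)) hm]

theorem pvKI (b m : Int) (h0 : 0 ≤ m) (h1 : m < 256) :
    PySem.Int.band (PySem.Int.band b 255) m = PySem.Int.band b m := by
  have := pvK b m.toNat (by omega)
  rwa [Int.toNat_of_nonneg h0] at this

theorem pv_band255_bounds (b : Int) : 0 ≤ PySem.Int.band b 255 ∧ PySem.Int.band b 255 < 256 := by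
  by_cases hb : 0 ≤ b
  · rw [PySem.Int.band_of_nonneg hb (by norm_num)]
    have : b.toNat &&& (255:Int).toNat ≤ 255 := le_trans Nat.and_le_right (by norm_num)
    constructor <;> [positivity; exact_mod_cast lt_of_le_of_lt this (by norm_num)]
  · have : PySem.Int.band b 255 = ((255 - (255 &&& (-b-1).toNat) : Nat) : Int) := by
      simp [PySem.Int.band, hb]
    rw [this]
    constructor <;> [positivity; exact_mod_cast Nat.lt_succ_of_le (Nat.sub_le _ _)]

-- the two ports agree on every byte value 0..255 (kernel evaluation)
theorem pv_fin : ∀ y : Fin 256, make_bitmaps y.val = make_bitmaps_alt y.val := by decide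

theorem pv_main (b : Int) : make_bitmaps b = make_bitmaps_alt b := by
  obtain ⟨h0, h1⟩ := pv_band255_bounds b
  have hy : ((PySem.Int.band b 255).toNat : Int) = PySem.Int.band b 255 := Int.toNat_of_nonneg h0
  have hfin := pv_fin ⟨(PySem.Int.band b 255).toNat, by omega⟩
  simp only [hy] at hfin
  have halt : make_bitmaps_alt (PySem.Int.band b 255) = make_bitmaps_alt b := by
    unfold make_bitmaps_alt
    rw [pvKI b 255 (by norm_num) (by norm_num)]
  rw [← halt, ← hfin]
  simp [make_bitmaps, pvPins, PySem.List.enumerate]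
  rw [pvKI b 1 (by decide) (by decide),
      pvKI b ((1:Int) <<< (1:Nat)) (by decide) (by decide),
      pvKI b ((1:Int) <<< (2:Nat)) (by decide) (by decide),
      pvKI b ((1:Int) <<< (3:Nat)) (by decide) (by decide),
      pvKI b ((1:Int) <<< (4:Nat)) (by decide) (by decide),
      pvKI b ((1:Int) <<< (5:Nat)) (by decide) (by decide),
      pvKI b ((1:Int) <<< (6:Nat)) (by decide) (by decide),
      pvKI b ((1:Int) <<< (7:Nat)) (by decide) (by decide)]

-- ===== VERDICT (by name: the statement is the Claim_ definition above) =====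
theorem make_bitmaps_spec : Claim_equal_make_bitmaps := by
  intro b _
  exact pv_main b
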